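-- pv_equiv track=rewrite | github.com/gtavella/Esami | 17-07-18/es2.py | esamina_lista
-- ===== SOURCE A (Python) =====
-- def esamina_lista(L):
--     # i e' l'indice 'mobile', mentre n rimane fermo
--     i = 0
--     n = len(L)-1
--     # itera solo fino alla meta' della lista
--     while i < len(L)/2:
--         # elemento attuale
--         a = L[i]
--         # elemento simmetrico
--         b = L[n-i]
--         # sottolista dall'i-esimo elemento al suo simmetrico (con estremi esclusi)
--         somma_sottolista_interna = sum(L[i+1:n-i])
--         somma_estremi = a + b
--         # esco al soddisfacimento della condizione negata
--         if somma_estremi <= somma_sottolista_interna: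
--             return False
--         i += 1
--     return True
-- ===== SOURCE B (Python) =====
-- # O(n): one total sum up front; running left/right sums make each inner-sublist sum O(1).
-- def esamina_lista(L):
--     n = len(L)
--     total = sum(L)
--     left = 0   # sum of L[:i]
--     right = 0  # sum of L[n-i:]
--     for i in range((n + 1) // 2):
--         a = L[i]
--         b = L[n - 1 - i]
--         left += a
--         right += b
--         inner = total - left - right if i + 1 < n - 1 - i else 0
--         if a + b <= inner:
--             return False
--     return True
-- ===== Notes on version B (the rewrite author's own statement) =====
-- stated objective: faster
-- what changed: Replaces A's O(n) slice sum per iteration with one upfront total sum and running left/right sums, making each inner-sublist sum an O(1) subtraction.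
import Mathlib
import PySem

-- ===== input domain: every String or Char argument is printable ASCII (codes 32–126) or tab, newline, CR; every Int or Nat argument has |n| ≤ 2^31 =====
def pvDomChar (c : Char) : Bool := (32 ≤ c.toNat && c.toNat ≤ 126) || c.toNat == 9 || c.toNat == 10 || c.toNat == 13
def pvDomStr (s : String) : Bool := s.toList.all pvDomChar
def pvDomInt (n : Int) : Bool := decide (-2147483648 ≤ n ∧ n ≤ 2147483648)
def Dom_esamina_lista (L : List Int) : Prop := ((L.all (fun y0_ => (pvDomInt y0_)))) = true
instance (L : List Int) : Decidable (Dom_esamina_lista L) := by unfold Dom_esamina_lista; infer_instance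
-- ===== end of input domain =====

-- B replaces A's per-iteration slice sum by one total sum plus running left/right sums (intended as faster: O(n) total vs A's O(n^2); a timing run's measurement varies with the input family).

-- ===== PORT A =====
-- A's while-loop as recursion on the index i.  The guard 'i < len(L)/2' (true division,
-- exact on these sizes) is '2*i < len(L)'.  Inside the loop 0 ≤ i ≤ n-i < len(L), so the
-- indexings L[i] and L[n-i] never raise and pyGetD is exact here.
def esaminaListaLoop (L : List Int) (n : Int) (i : Nat) : Bool :=
  if h : 2 * i < L.length then
    let a := PySem.List.pyGetD L (i : Int) 0
    let b := PySem.List.pyGetD L (n - i) 0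
    let somma := (PySem.List.slice L (some ((i : Int) + 1)) (some (n - i))).sum
    if a + b ≤ somma then false else esaminaListaLoop L n (i + 1)
  else true
termination_by L.length - i
decreasing_by omega

def esamina_lista (L : List Int) : Bool :=
  esaminaListaLoop L ((L.length : Int) - 1) 0

-- ===== PORT B =====
-- Source B: one total sum up front; the for-range loop keeps running left/right sums
-- (left = sum L[:i], right = sum L[n-i:]) and exits early like the Python.
-- All indexings are in range inside the loop, so pyGetD is exact here.
def esaminaAltLoop (L : List Int) (total left right : Int) (i : Nat) : Bool :=
  if h : i < (L.length + 1) / 2 then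
    let a := PySem.List.pyGetD L (i : Int) 0
    let b := PySem.List.pyGetD L ((L.length : Int) - 1 - i) 0
    let left' := left + a
    let right' := right + b
    let inner := if (i : Int) + 1 < (L.length : Int) - 1 - i then total - left' - right' else 0
    if a + b ≤ inner then false else esaminaAltLoop L total left' right' (i + 1)
  else true
termination_by (L.length + 1) / 2 - i
decreasing_by omega

def esamina_lista_alt (L : List Int) : Bool :=
  esaminaAltLoop L L.sum 0 0 0

-- ===== PRECONDITION & SPEC =====
def Spec_esamina_lista (L : List Int) (out : Bool) : Prop := out = esamina_lista_alt L
instance (L : List Int) (out : Bool) : Decidable (Spec_esamina_lista L out) := by unfold Spec_esamina_lista; infer_instance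

-- ===== CLAIM (what is proved, stated in full; the proofs are below) =====
def Claim_equal_esamina_lista : Prop := ∀ (L : List Int), Dom_esamina_lista L → Spec_esamina_lista L (esamina_lista L)

-- ===== LEMMAS AND PROOFS =====

lemma pvSlice_sum (L : List Int) (a b : Nat) :
    (PySem.List.slice L (some (a : Int)) (some (b : Int))).sum
      = if a < b then (L.take b).sum - (L.take a).sum else 0 := by
  rw [PySem.List.slice_toNat L (by positivity) (by positivity)]
  simp only [Int.toNat_natCast]
  by_cases hab : a < b
  · rw [if_pos hab]
    have hb' : L.take b = L.take a ++ (List.take (b - a) (List.drop a L)) := by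
      rw [← List.take_add]
      congr 1
      omega
    rw [hb', List.sum_append]
    ring
  · rw [if_neg hab]
    have : b - a = 0 := by omega
    simp [this]

lemma pvSum_take_succ (L : List Int) (k : Nat) (h : k < L.length) :
    (L.take (k + 1)).sum = (L.take k).sum + L.getD k 0 := by
  rw [List.sum_take_succ L k h, List.getD_eq_getElem L 0 h]

lemma pvSum_drop (L : List Int) (k : Nat) (h : k < L.length) :
    (L.drop k).sum = L.getD k 0 + (L.drop (k + 1)).sum := by
  rw [List.drop_eq_getElem_cons h, List.sum_cons, List.getD_eq_getElem L 0 h]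

lemma pvSum_split (L : List Int) (k : Nat) :
    L.sum = (L.take k).sum + (L.drop k).sum := by
  conv_lhs => rw [← List.take_append_drop k L]
  rw [List.sum_append]

-- The two loops agree, given B's running-sum invariant.
lemma pvLoops_eq (L : List Int) : ∀ (d i : Nat), L.length ≤ i + d → ∀ (left right : Int),
    left = (L.take i).sum → right = (L.drop (L.length - i)).sum →
    esaminaListaLoop L ((L.length : Int) - 1) i = esaminaAltLoop L L.sum left right i := by
  intro d
  induction d with
  | zero =>
      intro i hi left right _ _
      rw [esaminaListaLoop, dif_neg (by omega), esaminaAltLoop, dif_neg (by omega)]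
  | succ d ih =>
      intro i hi left right hl hr
      by_cases h2 : 2 * i < L.length
      · have hij : ((L.length : Int) - 1 - (i : Int)) = ((L.length - 1 - i : Nat) : Int) := by
          push_cast; omega
        rw [esaminaListaLoop, dif_pos h2, esaminaAltLoop, dif_pos (by omega)]
        have hgi : PySem.List.pyGetD L (i : Int) 0 = L.getD i 0 :=
          PySem.List.pyGetD_natCast L i 0
        have hgj : PySem.List.pyGetD L ((L.length - 1 - i : Nat) : Int) 0
            = L.getD (L.length - 1 - i) 0 :=
          PySem.List.pyGetD_natCast L (L.length - 1 - i) 0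
        have hdrop : (L.drop (L.length - i)).sum + L.getD (L.length - 1 - i) 0
            = (L.drop (L.length - 1 - i)).sum := by
          have h3 := pvSum_drop L (L.length - 1 - i) (by omega)
          rw [show L.length - 1 - i + 1 = L.length - i by omega] at h3
          omega
        -- A's slice sum equals B's running-sum expression
        have hinner :
            (PySem.List.slice L (some ((i : Int) + 1)) (some (((L.length : Int) - 1) - i))).sum
              = (if (i : Int) + 1 < (L.length : Int) - 1 - i then
                  L.sum - (left + PySem.List.pyGetD L (i : Int) 0)
                        - (right + PySem.List.pyGetD L ((L.length : Int) - 1 - i) 0)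
                else 0) := by
          have h1 : ((i : Int) + 1) = ((i + 1 : Nat) : Int) := by push_cast; ring
          rw [show (((L.length : Int) - 1) - (i : Int)) = ((L.length - 1 - i : Nat) : Int) from hij,
              h1, pvSlice_sum L (i + 1) (L.length - 1 - i)]
          simp only [Nat.cast_lt]
          by_cases hlt : i + 1 < L.length - 1 - i
          · rw [if_pos hlt, if_pos hlt, hgi, hgj, hl, hr, ← pvSum_take_succ L i (by omega),
                hdrop, pvSum_split L (L.length - 1 - i)]
            ring
          · rw [if_neg hlt, if_neg hlt]
        rw [hinner]
        by_cases hc : PySem.List.pyGetD L (i : Int) 0 + PySem.List.pyGetD L ((L.length : Int) - 1 - i) 0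
            ≤ (if (i : Int) + 1 < (L.length : Int) - 1 - i then
                L.sum - (left + PySem.List.pyGetD L (i : Int) 0)
                      - (right + PySem.List.pyGetD L ((L.length : Int) - 1 - i) 0)
              else 0)
        · rw [if_pos hc, if_pos hc]
        · rw [if_neg hc, if_neg hc]
          refine ih (i + 1) (by omega) _ _ ?_ ?_
          · rw [hl, hgi, pvSum_take_succ L i (by omega)]
          · rw [hr, show ((L.length : Int) - 1 - (i : Int)) = ((L.length - 1 - i : Nat) : Int) from hij,
                hgj, show L.length - (i + 1) = L.length - 1 - i by omega]
            omega
      · rw [esaminaListaLoop, dif_neg h2, esaminaAltLoop, dif_neg (by omega)]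

-- ===== VERDICT (by name: the statement is the Claim_ definition above) =====
theorem esamina_lista_spec : Claim_equal_esamina_lista := by
  intro L _
  unfold Spec_esamina_lista esamina_lista esamina_lista_alt
  exact pvLoops_eq L L.length 0 (by omega) 0 0 (by simp) (by simp)
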